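-- pv_equiv track=rewrite | github.com/Avikalp-Karrahe/IQKiller | bucket_map.py | map_facts
-- ===== SOURCE A (Python) =====
-- from typing import Dict, List
--
-- def map_facts(facts: Dict[str, str]) -> Dict[str, List[str]]:
--     """Map enriched facts into 10 predefined buckets"""
--
--     # Initialize all 10 buckets (must exist even if empty)
--     buckets = {
--         "Team & Manager": [],
--         "Tech Stack Snapshot": [],
--         "Business Context": [],
--         "Comp & Leveling": [],
--         "Career Trajectory": [],
--         "Culture/WLB": [],
--         "Interview Runway": [],
--         "Onboarding & Tooling": [],
--         "Location/Remote": [],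
--         "Strategic Risks": []
--     }
--
--     # Map facts to appropriate buckets
--     for key, value in facts.items():
--         if not value or value.strip() == "":
--             continue
--
--         # Team & Manager bucket
--         if any(keyword in key.lower() for keyword in ["manager", "team", "hiring"]):
--             buckets["Team & Manager"].append(f"**{key.replace('_', ' ').title()}**: {value}")
--
--         # Tech Stack bucket
--         elif any(keyword in key.lower() for keyword in ["stack", "tools", "github", "tech"]):
--             buckets["Tech Stack Snapshot"].append(f"**{key.replace('_', ' ').title()}**: {value}")
--
--         # Business Context bucket
--         elif any(keyword in key.lower() for keyword in ["news", "business", "company", "domain"]):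
--             buckets["Business Context"].append(f"**{key.replace('_', ' ').title()}**: {value}")
--
--         # Compensation bucket
--         elif any(keyword in key.lower() for keyword in ["salary", "comp", "levels", "pay"]):
--             buckets["Comp & Leveling"].append(f"**{key.replace('_', ' ').title()}**: {value}")
--
--         # Culture/WLB bucket
--         elif any(keyword in key.lower() for keyword in ["culture", "blind", "rating", "wlb", "work"]):
--             buckets["Culture/WLB"].append(f"**{key.replace('_', ' ').title()}**: {value}")
--
--         # Location/Remote bucket
--         elif any(keyword in key.lower() for keyword in ["location", "remote", "office", "hybrid"]):
--             buckets["Location/Remote"].append(f"**{key.replace('_', ' ').title()}**: {value}")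
--
--         # Default to Business Context for unmatched items
--         else:
--             buckets["Business Context"].append(f"**{key.replace('_', ' ').title()}**: {value}")
--
--     # Remove empty buckets to hide them in the UI
--     buckets = {k: v for k, v in buckets.items() if v}
--
--     return buckets
-- ===== SOURCE B (Python) =====
-- from typing import Dict, List
--
-- _RULES = [
--     ("Team & Manager", ["manager", "team", "hiring"]),
--     ("Tech Stack Snapshot", ["stack", "tools", "github", "tech"]),
--     ("Business Context", ["news", "business", "company", "domain"]),
--     ("Comp & Leveling", ["salary", "comp", "levels", "pay"]),
--     ("Culture/WLB", ["culture", "blind", "rating", "wlb", "work"]),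
--     ("Location/Remote", ["location", "remote", "office", "hybrid"]),
-- ]
--
-- _ORDER = ["Team & Manager", "Tech Stack Snapshot", "Business Context",
--           "Comp & Leveling", "Career Trajectory", "Culture/WLB",
--           "Interview Runway", "Onboarding & Tooling", "Location/Remote",
--           "Strategic Risks"]
--
-- def _bucket(key: str) -> str:
--     kl = key.lower()
--     for name, kws in _RULES:
--         if any(kw in kl for kw in kws):
--             return name
--     return "Business Context"
--
-- def _fmt(key: str, value: str) -> str:
--     return f"**{key.replace('_', ' ').title()}**: {value}"
--
-- def map_facts(facts: Dict[str, str]) -> Dict[str, List[str]]: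
--     tagged = [(_bucket(k), _fmt(k, v)) for k, v in facts.items()
--               if v and v.strip() != ""]
--     return {name: [e for b, e in tagged if b == name]
--             for name in _ORDER if any(b == name for b, _ in tagged)}
-- ===== Notes on version B (the rewrite author's own statement) =====
-- stated objective: simpler
-- what changed: Replaces A's six-way if/elif keyword chain and the mutable 10-bucket dict mutated in place by an ordered rule table with a first-match lookup, a single map-and-filter pass producing (bucket, entry) pairs, and a group-by-bucket comprehension over the bucket order.
import Mathlib
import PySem

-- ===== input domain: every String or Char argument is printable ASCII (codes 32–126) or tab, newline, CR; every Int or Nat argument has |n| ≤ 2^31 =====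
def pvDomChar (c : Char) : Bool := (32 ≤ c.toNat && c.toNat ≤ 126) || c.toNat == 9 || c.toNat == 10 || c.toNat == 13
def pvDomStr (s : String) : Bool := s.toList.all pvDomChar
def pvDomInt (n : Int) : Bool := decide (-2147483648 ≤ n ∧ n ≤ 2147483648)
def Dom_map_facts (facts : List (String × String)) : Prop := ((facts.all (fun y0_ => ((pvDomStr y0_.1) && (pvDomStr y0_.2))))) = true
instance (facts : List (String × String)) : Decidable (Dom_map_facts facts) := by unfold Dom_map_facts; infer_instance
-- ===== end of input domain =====

-- B replaces A's per-fact if/elif branch chain and mutable bucket dict by a rule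
-- table with a first-match lookup plus a map-then-group-by-bucket pipeline (objective: simpler).
-- Both ports read the dict argument as 'PySem.Dict.ofList facts' (the assoc list IS a dict).

-- ===== PORT A =====
-- Python str.title(), ported by hand over the character list; exact on ASCII input
-- (a letter is uppercased after a non-letter, lowercased after a letter).
def pyTitleAux : List Char → Bool → List Char
  | [], _ => []
  | c :: rest, prevCased =>
      if PySem.Chars.isalpha c then
        (if prevCased then PySem.Chars.lowerChar c else PySem.Chars.upperChar c) :: pyTitleAux rest true
      else
        c :: pyTitleAux rest false

def pyTitle (s : String) : String := String.ofList (pyTitleAux s.toList false)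

def bucketsInit : PySem.Dict String (List String) :=
  PySem.Dict.ofList [("Team & Manager", []), ("Tech Stack Snapshot", []),
    ("Business Context", []), ("Comp & Leveling", []), ("Career Trajectory", []),
    ("Culture/WLB", []), ("Interview Runway", []), ("Onboarding & Tooling", []),
    ("Location/Remote", []), ("Strategic Risks", [])]

def map_facts (facts : List (String × String)) : List (String × List String) :=
  let buckets := (PySem.Dict.ofList facts).items.foldl (fun d kv =>
    let key := kv.1
    let value := kv.2
    if value == "" || PySem.Str.strip value == "" then d
    else
      let kl := PySem.Str.lower key
      let entry := "**" ++ pyTitle (PySem.Str.replace key "_" " ") ++ "**: " ++ value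
      if ["manager", "team", "hiring"].any (fun kw => PySem.Str.isIn kw kl) then
        d.modify "Team & Manager" [] (· ++ [entry])
      else if ["stack", "tools", "github", "tech"].any (fun kw => PySem.Str.isIn kw kl) then
        d.modify "Tech Stack Snapshot" [] (· ++ [entry])
      else if ["news", "business", "company", "domain"].any (fun kw => PySem.Str.isIn kw kl) then
        d.modify "Business Context" [] (· ++ [entry])
      else if ["salary", "comp", "levels", "pay"].any (fun kw => PySem.Str.isIn kw kl) then
        d.modify "Comp & Leveling" [] (· ++ [entry])
      else if ["culture", "blind", "rating", "wlb", "work"].any (fun kw => PySem.Str.isIn kw kl) then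
        d.modify "Culture/WLB" [] (· ++ [entry])
      else if ["location", "remote", "office", "hybrid"].any (fun kw => PySem.Str.isIn kw kl) then
        d.modify "Location/Remote" [] (· ++ [entry])
      else
        d.modify "Business Context" [] (· ++ [entry])) bucketsInit
  (PySem.Dict.ofList (buckets.items.filter (fun p => !p.2.isEmpty))).items

-- ===== PORT B =====
def bucketRules : List (String × List String) :=
  [("Team & Manager", ["manager", "team", "hiring"]),
   ("Tech Stack Snapshot", ["stack", "tools", "github", "tech"]),
   ("Business Context", ["news", "business", "company", "domain"]),
   ("Comp & Leveling", ["salary", "comp", "levels", "pay"]),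
   ("Culture/WLB", ["culture", "blind", "rating", "wlb", "work"]),
   ("Location/Remote", ["location", "remote", "office", "hybrid"])]

def bucketOrder : List String :=
  ["Team & Manager", "Tech Stack Snapshot", "Business Context", "Comp & Leveling",
   "Career Trajectory", "Culture/WLB", "Interview Runway", "Onboarding & Tooling",
   "Location/Remote", "Strategic Risks"]

def bucketOf (key : String) : String :=
  let kl := PySem.Str.lower key
  ((bucketRules.find? (fun r => r.2.any (fun kw => PySem.Str.isIn kw kl))).map Prod.fst).getD
    "Business Context"

def fmtFact (key value : String) : String :=
  "**" ++ pyTitle (PySem.Str.replace key "_" " ") ++ "**: " ++ value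

def map_facts_alt (facts : List (String × String)) : List (String × List String) :=
  let tagged := (PySem.Dict.ofList facts).items.filterMap (fun kv =>
    if kv.2 != "" && PySem.Str.strip kv.2 != "" then some (bucketOf kv.1, fmtFact kv.1 kv.2)
    else none)
  (bucketOrder.filter (fun n => tagged.any (fun t => t.1 == n))).map
    (fun n => (n, (tagged.filter (fun t => t.1 == n)).map (·.2)))

-- ===== PRECONDITION & SPEC =====
def Spec_map_facts (facts : List (String × String)) (out : List (String × List String)) : Prop := out = map_facts_alt facts
instance (facts : List (String × String)) (out : List (String × List String)) : Decidable (Spec_map_facts facts out) := by unfold Spec_map_facts; infer_instance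

-- ===== CLAIM (what is proved, stated in full; the proofs are below) =====
def Claim_equal_map_facts : Prop := ∀ (facts : List (String × String)), Dom_map_facts facts → Spec_map_facts facts (map_facts facts)

-- ===== LEMMAS AND PROOFS =====

-- stepA / tagB are proof-side names for the two loop bodies (definitionally the
-- lambdas inside map_facts and map_facts_alt).
def stepA (d : PySem.Dict String (List String)) (kv : String × String) : PySem.Dict String (List String) :=
    let key := kv.1
    let value := kv.2
    if value == "" || PySem.Str.strip value == "" then d
    else
      let kl := PySem.Str.lower key
      let entry := "**" ++ pyTitle (PySem.Str.replace key "_" " ") ++ "**: " ++ value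
      if ["manager", "team", "hiring"].any (fun kw => PySem.Str.isIn kw kl) then
        d.modify "Team & Manager" [] (· ++ [entry])
      else if ["stack", "tools", "github", "tech"].any (fun kw => PySem.Str.isIn kw kl) then
        d.modify "Tech Stack Snapshot" [] (· ++ [entry])
      else if ["news", "business", "company", "domain"].any (fun kw => PySem.Str.isIn kw kl) then
        d.modify "Business Context" [] (· ++ [entry])
      else if ["salary", "comp", "levels", "pay"].any (fun kw => PySem.Str.isIn kw kl) then
        d.modify "Comp & Leveling" [] (· ++ [entry])
      else if ["culture", "blind", "rating", "wlb", "work"].any (fun kw => PySem.Str.isIn kw kl) then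
        d.modify "Culture/WLB" [] (· ++ [entry])
      else if ["location", "remote", "office", "hybrid"].any (fun kw => PySem.Str.isIn kw kl) then
        d.modify "Location/Remote" [] (· ++ [entry])
      else
        d.modify "Business Context" [] (· ++ [entry])

def tagB (kv : String × String) : Option (String × String) :=
  if kv.2 != "" && PySem.Str.strip kv.2 != "" then some (bucketOf kv.1, fmtFact kv.1 kv.2) else none

lemma step_eq (d : PySem.Dict String (List String)) (kv : String × String) :
    stepA d kv = match tagB kv with
      | some p => d.modify p.1 [] (· ++ [p.2])
      | none => d := by
  simp only [stepA, tagB, bucketOf, bucketRules, fmtFact, List.find?, bne]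
  cases hv : kv.2 == "" <;> cases hs : PySem.Str.strip kv.2 == "" <;>
    simp only [hv, hs, Bool.or_true, Bool.true_or, Bool.false_or, Bool.not_true, Bool.not_false,
      Bool.and_true, Bool.true_and, Bool.and_false, Bool.false_and, if_true, if_false] <;>
  first
  | rfl
  | (cases c1 : (["manager", "team", "hiring"].any (fun kw => PySem.Str.isIn kw (PySem.Str.lower kv.1))) <;>
     cases c2 : (["stack", "tools", "github", "tech"].any (fun kw => PySem.Str.isIn kw (PySem.Str.lower kv.1))) <;>
     cases c3 : (["news", "business", "company", "domain"].any (fun kw => PySem.Str.isIn kw (PySem.Str.lower kv.1))) <;>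
     cases c4 : (["salary", "comp", "levels", "pay"].any (fun kw => PySem.Str.isIn kw (PySem.Str.lower kv.1))) <;>
     cases c5 : (["culture", "blind", "rating", "wlb", "work"].any (fun kw => PySem.Str.isIn kw (PySem.Str.lower kv.1))) <;>
     cases c6 : (["location", "remote", "office", "hybrid"].any (fun kw => PySem.Str.isIn kw (PySem.Str.lower kv.1))) <;>
     simp [c1, c2, c3, c4, c5, c6])

lemma foldl_step (l : List (String × String)) (d : PySem.Dict String (List String)) :
    l.foldl stepA d = (l.filterMap tagB).foldl (fun d p => d.modify p.1 [] (· ++ [p.2])) d := by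
  induction l generalizing d with
  | nil => rfl
  | cons kv rest ih =>
      rw [List.foldl_cons, step_eq, List.filterMap_cons]
      cases h : tagB kv <;> simp [ih]

lemma bucketOf_mem (k : String) : bucketOf k ∈ bucketOrder := by
  simp only [bucketOf]
  rcases hf : bucketRules.find? (fun r => r.2.any (fun kw => PySem.Str.isIn kw (PySem.Str.lower k))) with _ | r
  · rw [hf]; decide
  · rw [hf]
    have hr := List.mem_of_find?_eq_some hf
    fin_cases hr <;> decide

lemma init_keys : bucketsInit.keys = bucketOrder := by decide

lemma init_getD (k : String) : bucketsInit.getD k [] = [] := by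
  have h : bucketsInit = PySem.Dict.mk [("Team & Manager", []), ("Tech Stack Snapshot", []),
    ("Business Context", []), ("Comp & Leveling", []), ("Career Trajectory", []),
    ("Culture/WLB", []), ("Interview Runway", []), ("Onboarding & Tooling", []),
    ("Location/Remote", []), ("Strategic Risks", [])] := by decide
  rw [h, PySem.Dict.getD_eq_get?_getD]
  simp only [PySem.Dict.get?_mk_cons]
  split_ifs <;> rfl

lemma set_update_subset (s : PySem.Set String) (xs : List String) (h : ∀ x ∈ xs, x ∈ s) :
    s.update xs = s := by
  rw [PySem.Set.update_eq_append_filter]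
  have hnil : (PySem.Set.ofList xs).filter (fun y => !s.contains y) = [] := by
    rw [List.filter_eq_nil_iff]
    intro a ha
    have hx : a ∈ xs := (PySem.Set.mem_ofList xs a).mp ha
    have hc := (PySem.Set.contains_iff s a).mpr (h a hx)
    simp [h a hx]
  rw [hnil, List.append_nil]

lemma ofList_items (l : List (String × List String)) (h : (l.map Prod.fst).Nodup) :
    (PySem.Dict.ofList l).items = l := by
  have he : PySem.Dict.ofList l = l.foldl (fun d p => d.insert p.1 p.2) PySem.Dict.empty := rfl
  rw [he, PySem.Dict.items_foldl_insert_fresh l Prod.fst Prod.snd PySem.Dict.empty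
    (fun a _ => PySem.Dict.contains_empty _) h]
  simp [show (PySem.Dict.empty : PySem.Dict String (List String)).items = [] from rfl]

lemma core (l : List (String × String)) :
    (PySem.Dict.ofList ((l.foldl stepA bucketsInit).items.filter (fun p => !p.2.isEmpty))).items
      = (bucketOrder.filter (fun n => (l.filterMap tagB).any (fun t => t.1 == n))).map
          (fun n => (n, ((l.filterMap tagB).filter (fun t => t.1 == n)).map (·.2))) := by
  rw [foldl_step]
  set T := l.filterMap tagB with hT
  have hTmem : ∀ t ∈ T, t.1 ∈ bucketOrder := by
    intro t ht
    rcases List.mem_filterMap.mp ht with ⟨kv, _, htag⟩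
    unfold tagB at htag
    split_ifs at htag
    · cases htag; exact bucketOf_mem kv.1
  set F := T.foldl (fun d p => d.modify p.1 [] (· ++ [p.2])) bucketsInit with hF
  have hkeys : F.keys = bucketOrder := by
    rw [hF, show (T.foldl (fun d p => d.modify p.1 [] (· ++ [p.2])) bucketsInit).keys
          = PySem.Set.update bucketsInit.keys (T.map Prod.fst) from
        PySem.Dict.keys_foldl_modify_key T Prod.fst [] (fun _ p => (· ++ [p.2])) bucketsInit,
      set_update_subset _ _ (by intro x hx
                                rcases List.mem_map.mp hx with ⟨t, ht, rfl⟩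
                                rw [init_keys]; exact hTmem t ht),
      init_keys]
  have hnodup : F.keys.Nodup := by rw [hkeys]; decide
  have hg : ∀ k, F.getD k [] = (T.filter (fun t => t.1 == k)).map (·.2) := by
    intro k
    rw [hF, show (T.foldl (fun d p => d.modify p.1 [] (· ++ [p.2])) bucketsInit).getD k []
          = bucketsInit.getD k [] ++ (T.filter (fun p => p.1 == k)).map (fun x => x.2) from
        PySem.Dict.getD_foldl_modify_append T bucketsInit k,
      init_getD, List.nil_append]
  rw [PySem.Dict.items_eq_map_keys F hnodup [], hkeys]
  have hmap : bucketOrder.map (fun k => (k, F.getD k []))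
      = bucketOrder.map (fun n => (n, (T.filter (fun t => t.1 == n)).map (·.2))) :=
    List.map_congr_left (fun k _ => by rw [hg k])
  rw [hmap, ofList_items _ (by
    have hs : (((bucketOrder.map (fun n => (n, (T.filter (fun t => t.1 == n)).map (·.2)))).filter
        (fun p => !p.2.isEmpty)).map Prod.fst).Sublist
        ((bucketOrder.map (fun n => (n, (T.filter (fun t => t.1 == n)).map (·.2)))).map Prod.fst) :=
      List.filter_sublist.map Prod.fst
    refine List.Nodup.sublist hs ?_
    rw [List.map_map]
    simpa using (by decide : bucketOrder.Nodup))]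
  rw [List.filter_map]
  refine congrArg _ (List.filter_congr ?_)
  intro n _
  show (!((T.filter (fun t => t.1 == n)).map (·.2)).isEmpty) = T.any (fun t => t.1 == n)
  rw [Bool.eq_iff_iff]
  simp [List.any_eq_true]


theorem map_facts_eq_alt (facts : List (String × String)) : map_facts facts = map_facts_alt facts :=
  (rfl : map_facts facts = _).trans ((core (PySem.Dict.ofList facts).items).trans rfl)

-- ===== VERDICT (by name: the statement is the Claim_ definition above) =====
theorem map_facts_spec : Claim_equal_map_facts := by
  intro facts _
  exact map_facts_eq_alt facts
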